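-- pv_equiv track=rewrite | github.com/Axerzz/RoadPricing | env_ctrl.py | get_road_count
-- ===== SOURCE A (Python) =====
-- def get_road_count(vehicle_num_count_dict):
--     """
--     获取每条road上的正在行驶的车辆数量
--     :param vehicle_num_count_dict:
--     :return:
--     """
--     process_count_dict = {}
--     for road in vehicle_num_count_dict:
--         key = road[:10]
--         if key in process_count_dict:
--             process_count_dict[key] = process_count_dict[key] + vehicle_num_count_dict[road]
--         else:
--             process_count_dict[key] = vehicle_num_count_dict[road]
--     return process_count_dict
-- ===== SOURCE B (Python) =====
-- def get_road_count(vehicle_num_count_dict):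
--     """
--     获取每条road上的正在行驶的车辆数量
--     :param vehicle_num_count_dict:
--     :return:
--     """
--     prefixes = []
--     for road in vehicle_num_count_dict:
--         p = road[:10]
--         if p not in prefixes:
--             prefixes.append(p)
--     result = {}
--     for p in prefixes:
--         total = 0
--         for road in vehicle_num_count_dict:
--             if road[:10] == p:
--                 total += vehicle_num_count_dict[road]
--         result[p] = total
--     return result
-- ===== Notes on version B (the rewrite author's own statement) =====
-- stated objective: alternative
-- what changed: B replaces A's single accumulating pass that updates a running dict with a two-phase group-by: first collect the distinct 10-char prefixes in first-appearance order, then for each prefix re-scan the dict and sum its matching counts.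
import Mathlib
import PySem

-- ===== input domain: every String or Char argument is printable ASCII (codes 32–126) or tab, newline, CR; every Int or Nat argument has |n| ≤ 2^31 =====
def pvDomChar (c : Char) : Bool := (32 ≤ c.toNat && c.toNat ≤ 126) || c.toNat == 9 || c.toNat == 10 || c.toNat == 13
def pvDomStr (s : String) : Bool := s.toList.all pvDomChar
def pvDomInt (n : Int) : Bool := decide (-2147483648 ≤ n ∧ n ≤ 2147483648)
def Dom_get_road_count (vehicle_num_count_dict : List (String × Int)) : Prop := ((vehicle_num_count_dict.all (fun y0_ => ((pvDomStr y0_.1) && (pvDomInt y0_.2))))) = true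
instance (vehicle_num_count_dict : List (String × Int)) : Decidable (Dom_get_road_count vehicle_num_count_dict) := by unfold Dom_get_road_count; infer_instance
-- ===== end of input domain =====

-- B replaces A's single accumulating pass over the dict with a two-phase group-by (collect the
-- distinct 10-char prefixes in first-appearance order, then re-scan and sum per prefix);
-- same return value, no speed claim (objective: alternative).

-- road[:10], shared by both ports (both Pythons compute it the same way)
def pvPrefix (road : String) : String := PySem.Str.slice road none (some 10)

-- ===== PORT A =====
def get_road_count (vehicle_num_count_dict : List (String × Int)) : List (String × Int) :=
  let vd := PySem.Dict.ofList vehicle_num_count_dict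
  (vd.keys.foldl (fun pd road =>
      let key := pvPrefix road
      if pd.contains key then pd.insert key (pd.getD key 0 + vd.getD road 0)
      else pd.insert key (vd.getD road 0))
    (PySem.Dict.empty : PySem.Dict String Int)).items

-- ===== PORT B =====
def get_road_count_alt (vehicle_num_count_dict : List (String × Int)) : List (String × Int) :=
  let vd := PySem.Dict.ofList vehicle_num_count_dict
  let prefixes := vd.keys.foldl (fun acc road =>
      if pvPrefix road ∈ acc then acc else acc ++ [pvPrefix road]) ([] : List String)
  (prefixes.foldl (fun res p =>
      res.insert p (vd.keys.foldl (fun t road =>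
        if pvPrefix road == p then t + vd.getD road 0 else t) 0))
    (PySem.Dict.empty : PySem.Dict String Int)).items

-- ===== PRECONDITION & SPEC =====
def Spec_get_road_count (vehicle_num_count_dict : List (String × Int)) (out : List (String × Int)) : Prop := out = get_road_count_alt vehicle_num_count_dict
instance (vehicle_num_count_dict : List (String × Int)) (out : List (String × Int)) : Decidable (Spec_get_road_count vehicle_num_count_dict out) := by unfold Spec_get_road_count; infer_instance

-- ===== CLAIM (what is proved, stated in full; the proofs are below) =====
def Claim_equal_get_road_count : Prop := ∀ (vehicle_num_count_dict : List (String × Int)), Dom_get_road_count vehicle_num_count_dict → Spec_get_road_count vehicle_num_count_dict (get_road_count vehicle_num_count_dict)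

-- ===== LEMMAS AND PROOFS =====

-- A's if/else update of process_count_dict[key] is exactly dict.modify key 0 (· + val)
lemma stepA_eq_modify (pd : PySem.Dict String Int) (k : String) (val : Int) :
    (if pd.contains k then pd.insert k (pd.getD k 0 + val) else pd.insert k val)
      = pd.modify k 0 (· + val) := by
  by_cases h : pd.contains k <;>
    simp [PySem.Dict.modify, PySem.Dict.getD_of_not_contains, *]

-- invariant of A's loop: the running total stored under p is B's filtered sum over the same keys
lemma getD_foldA (v : String → Int) (p : String) :
    ∀ (ks : List String) (d : PySem.Dict String Int),
    (ks.foldl (fun d r => d.modify (pvPrefix r) 0 (· + v r)) d).getD p 0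
      = ks.foldl (fun t r => if pvPrefix r == p then t + v r else t) (d.getD p 0) := by
  intro ks
  induction ks with
  | nil => intro d; rfl
  | cons r ks ih =>
    intro d
    simp only [List.foldl_cons, ih]
    congr 1
    rw [PySem.Dict.getD_modify]
    by_cases h : pvPrefix r = p
    · subst h; simp
    · have h2 : (pvPrefix r == p) = false := by simp [h]
      simp [h2]
      intro hp; exact absurd hp.symm h

-- the two programs agree for ANY key list and any value function (both ports instantiate
-- ks with the dict's keys and v with its lookup)
lemma core (ks : List String) (v : String → Int) :
    (ks.foldl (fun pd road =>
        let key := pvPrefix road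
        if pd.contains key then pd.insert key (pd.getD key 0 + v road)
        else pd.insert key (v road))
      (PySem.Dict.empty : PySem.Dict String Int)).items
    = ((ks.foldl (fun acc road =>
          if pvPrefix road ∈ acc then acc else acc ++ [pvPrefix road]) ([] : List String)).foldl
        (fun res p => res.insert p (ks.foldl (fun t road =>
          if pvPrefix road == p then t + v road else t) 0))
        (PySem.Dict.empty : PySem.Dict String Int)).items := by
  have hstep : (fun (pd : PySem.Dict String Int) road =>
      let key := pvPrefix road
      if pd.contains key then pd.insert key (pd.getD key 0 + v road)
      else pd.insert key (v road))
      = fun pd road => pd.modify (pvPrefix road) 0 (· + v road) := by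
    funext pd road
    exact stepA_eq_modify pd (pvPrefix road) (v road)
  rw [hstep]
  -- B's collected prefixes are the ordered dedup of ks.map pvPrefix
  have hpref : (ks.foldl (fun acc road =>
      if pvPrefix road ∈ acc then acc else acc ++ [pvPrefix road]) ([] : List String))
      = PySem.Set.ofList (ks.map pvPrefix) := by
    simp only [← PySem.Set.add_eq_ite]
    rw [← PySem.Set.update_map_eq_foldl_add]
    exact PySem.Set.update_nil_left _
  rw [hpref]
  -- B's result dict is built by inserting fresh distinct keys, so its items are a map
  have hB : ∀ (ps : List String) (S : String → Int), ps.Nodup →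
      ((ps.foldl (fun res p => res.insert p (S p))
        (PySem.Dict.empty : PySem.Dict String Int)).items)
        = ps.map (fun p => (p, S p)) := by
    intro ps S hnd
    have := PySem.Dict.items_foldl_insert_fresh (l := ps)
      (k := fun p => p) (v := fun p => S p) (d := (PySem.Dict.empty : PySem.Dict String Int))
      (by intro a _; exact PySem.Dict.contains_empty a)
      (by simpa using hnd)
    simpa using this
  rw [hB _ _ (PySem.Set.nodup_ofList _)]
  -- A's result: keys are the same ordered dedup, values are the same sums
  have hkeysA : (ks.foldl (fun d r => d.modify (pvPrefix r) 0 (· + v r))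
      (PySem.Dict.empty : PySem.Dict String Int)).keys
      = PySem.Set.ofList (ks.map pvPrefix) := by
    rw [PySem.Dict.keys_foldl_modify_key]
    simp [PySem.Set.update_nil_left]
  have hnodA : (ks.foldl (fun d r => d.modify (pvPrefix r) 0 (· + v r))
      (PySem.Dict.empty : PySem.Dict String Int)).keys.Nodup := by
    rw [hkeysA]; exact PySem.Set.nodup_ofList _
  rw [PySem.Dict.items_eq_map_keys _ hnodA 0, hkeysA]
  apply List.map_congr_left
  intro p _
  have h := getD_foldA v p ks (PySem.Dict.empty : PySem.Dict String Int)
  simp only [PySem.Dict.getD_empty] at h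
  simp [h]

-- ===== VERDICT (by name: the statement is the Claim_ definition above) =====
theorem get_road_count_spec : Claim_equal_get_road_count := by
  intro l _
  show get_road_count l = get_road_count_alt l
  unfold get_road_count get_road_count_alt
  exact core (PySem.Dict.ofList l).keys (fun r => (PySem.Dict.ofList l).getD r 0)
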